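-- pv_equiv track=rewrite | github.com/sw-maestro-15-coma/coma-consumer | heatmap-popular-point-parser/domain/youtube_heatmap.py | __get_without_duplicate
-- ===== SOURCE A (Python) =====
-- def __get_without_duplicate(points: list[int], take: int) -> list[int]:
--     top_points: list[int] = []
--
--     for point in points:
--         if len(top_points) >= take:
--             break
--
--         for top_point in top_points:
--             if top_point - 60 < point < top_point + 60:
--                 break
--         else:
--             top_points.append(point)
--
--     return top_points
-- ===== SOURCE B (Python) =====
-- def _bisect_left(a, x, lo, hi):
--     if lo >= hi:
--         return lo
--     mid = (lo + hi) // 2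
--     if a[mid] < x:
--         return _bisect_left(a, x, mid + 1, hi)
--     return _bisect_left(a, x, lo, mid)
--
--
-- def __get_without_duplicate(points: list[int], take: int) -> list[int]:
--     selected_sorted: list[int] = []   # the chosen points, kept sorted
--     result: list[int] = []            # the chosen points, in pick order
--
--     for point in points:
--         if len(result) >= take:
--             break
--         i = _bisect_left(selected_sorted, point, 0, len(selected_sorted))
--         # only the nearest sorted neighbours can lie within 60 of point
--         if (i > 0 and selected_sorted[i - 1] > point - 60) or \
--            (i < len(selected_sorted) and selected_sorted[i] < point + 60):
--             continue
--         selected_sorted.insert(i, point)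
--         result.append(point)
--
--     return result
-- ===== Notes on version B (the rewrite author's own statement) =====
-- stated objective: faster
-- what changed: Instead of linearly scanning all previously selected points for each candidate, B keeps the selected points in a separate sorted list and binary-searches it, checking only the two nearest neighbours for the within-60 conflict.
import Mathlib
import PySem

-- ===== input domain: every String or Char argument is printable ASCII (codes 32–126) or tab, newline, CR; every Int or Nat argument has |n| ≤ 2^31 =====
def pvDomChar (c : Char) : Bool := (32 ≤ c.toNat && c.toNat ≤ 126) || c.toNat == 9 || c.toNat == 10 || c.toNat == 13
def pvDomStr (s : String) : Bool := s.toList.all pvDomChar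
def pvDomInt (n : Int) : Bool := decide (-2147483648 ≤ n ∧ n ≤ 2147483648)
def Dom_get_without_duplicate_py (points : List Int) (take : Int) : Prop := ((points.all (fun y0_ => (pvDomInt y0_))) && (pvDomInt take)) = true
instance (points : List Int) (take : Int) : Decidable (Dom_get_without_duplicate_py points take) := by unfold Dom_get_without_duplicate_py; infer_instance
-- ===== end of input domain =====

-- B replaces A's inner linear scan of the already-selected points by a binary search over a
-- separately maintained sorted copy, checking only the two nearest neighbours (objective: faster).

-- ===== PORT A =====
-- inner `for top_point … break / else: append` = "some selected point lies within (point-60, point+60)"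
def pvA_conflict (top_points : List Int) (point : Int) : Bool :=
  top_points.any (fun tp => decide (tp - 60 < point) && decide (point < tp + 60))

def pvA_go (take : Int) (top_points : List Int) : List Int → List Int
  | [] => top_points
  | point :: rest =>
    if take ≤ (top_points.length : Int) then top_points
    else if pvA_conflict top_points point then pvA_go take top_points rest
    else pvA_go take (top_points ++ [point]) rest

def get_without_duplicate_py (points : List Int) (take : Int) : List Int :=
  pvA_go take [] points

-- ===== PORT B =====
-- Source B's recursive _bisect_left; at every call 0 ≤ lo ≤ hi ≤ a.length, so a[mid] = a.getD mid 0 (exact)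
def pvB_bisect (a : List Int) (x : Int) (lo hi : Nat) : Nat :=
  if _h : lo < hi then
    if a.getD ((lo + hi) / 2) 0 < x then pvB_bisect a x ((lo + hi) / 2 + 1) hi
    else pvB_bisect a x lo ((lo + hi) / 2)
  else lo
termination_by hi - lo
decreasing_by all_goals omega

def pvB_go (take : Int) (sel res : List Int) : List Int → List Int
  | [] => res
  | point :: rest =>
    if take ≤ (res.length : Int) then res
    else
      let i := pvB_bisect sel point 0 sel.length
      if (decide (0 < i) && decide (sel.getD (i - 1) 0 > point - 60)) ||
         (decide (i < sel.length) && decide (sel.getD i 0 < point + 60)) then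
        pvB_go take sel res rest
      else
        pvB_go take (sel.insertIdx i point) (res ++ [point]) rest

def get_without_duplicate_py_alt (points : List Int) (take : Int) : List Int :=
  pvB_go take [] [] points

-- ===== PRECONDITION & SPEC =====
def Spec_get_without_duplicate_py (points : List Int) (take : Int) (out : List Int) : Prop := out = get_without_duplicate_py_alt points take
instance (points : List Int) (take : Int) (out : List Int) : Decidable (Spec_get_without_duplicate_py points take out) := by unfold Spec_get_without_duplicate_py; infer_instance

-- ===== CLAIM (what is proved, stated in full; the proofs are below) =====
def Claim_equal_get_without_duplicate_py : Prop := ∀ (points : List Int) (take : Int), Dom_get_without_duplicate_py points take → Spec_get_without_duplicate_py points take (get_without_duplicate_py points take)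

-- ===== LEMMAS AND PROOFS =====

-- sorted lists are monotone through getD on in-range indices
theorem pv_sorted_getD {a : List Int} (hs : a.Sorted (· ≤ ·)) {i j : Nat}
    (hij : i ≤ j) (hj : j < a.length) : a.getD i 0 ≤ a.getD j 0 := by
  rw [List.getD_eq_getElem a 0 (lt_of_le_of_lt hij hj), List.getD_eq_getElem a 0 hj]
  rcases Nat.eq_or_lt_of_le hij with h | h
  · subst h; exact le_rfl
  · exact List.pairwise_iff_getElem.mp hs i j _ hj h

-- bisect_left specification on a sorted list
theorem pvB_bisect_spec (a : List Int) (x : Int) (hs : a.Sorted (· ≤ ·)) :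
    ∀ lo hi, lo ≤ hi → hi ≤ a.length →
    (∀ j, j < lo → a.getD j 0 < x) →
    (∀ j, hi ≤ j → j < a.length → x ≤ a.getD j 0) →
    lo ≤ pvB_bisect a x lo hi ∧ pvB_bisect a x lo hi ≤ hi ∧
    (∀ j, j < pvB_bisect a x lo hi → a.getD j 0 < x) ∧
    (∀ j, pvB_bisect a x lo hi ≤ j → j < a.length → x ≤ a.getD j 0) := by
  intro lo hi
  induction lo, hi using pvB_bisect.induct a x with
  | case1 lo hi hlt hmid ih =>
    intro _ hhi hlow hhigh
    rw [pvB_bisect, dif_pos hlt, if_pos hmid]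
    have hmidlt : (lo + hi) / 2 < hi := by omega
    have := ih (by omega) hhi
      (fun j hj => by
        rcases Nat.lt_or_ge j ((lo + hi) / 2) with h | h
        · exact lt_of_le_of_lt (pv_sorted_getD hs (le_of_lt h) (by omega)) hmid
        · have : j = (lo + hi) / 2 := by omega
          simpa [this] using hmid)
      hhigh
    exact ⟨by omega, this.2.1, this.2.2⟩
  | case2 lo hi hlt hmid ih =>
    intro hlo hhi hlow hhigh
    rw [pvB_bisect, dif_pos hlt, if_neg hmid]
    rw [not_lt] at hmid
    have := ih (by omega) (by omega) hlow
      (fun j hj hjlen => le_trans hmid (pv_sorted_getD hs hj hjlen))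
    exact ⟨this.1, by omega, this.2.2⟩
  | case3 lo hi hge =>
    intro hlo hhi hlow hhigh
    rw [pvB_bisect, dif_neg hge]
    exact ⟨le_rfl, hlo, hlow, fun j hj hjlen => hhigh j (by omega) hjlen⟩

-- B's neighbour test equals A's linear scan, given sel is a sorted permutation of res
theorem pv_conflict_eq (sel res : List Int) (p : Int) (hperm : sel.Perm res)
    (hs : sel.Sorted (· ≤ ·)) :
    ((decide (0 < pvB_bisect sel p 0 sel.length) &&
      decide (sel.getD (pvB_bisect sel p 0 sel.length - 1) 0 > p - 60)) ||
     (decide (pvB_bisect sel p 0 sel.length < sel.length) &&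
      decide (sel.getD (pvB_bisect sel p 0 sel.length) 0 < p + 60))) = pvA_conflict res p := by
  obtain ⟨-, hle, hlow, hhigh⟩ := pvB_bisect_spec sel p hs 0 sel.length (Nat.zero_le _) le_rfl
    (by omega) (by omega)
  set i := pvB_bisect sel p 0 sel.length with hi
  have hmem : ∀ tp, tp ∈ sel ↔ tp ∈ res := fun tp => hperm.mem_iff
  rw [Bool.eq_iff_iff]
  simp only [pvA_conflict, List.any_eq_true, Bool.or_eq_true, Bool.and_eq_true, decide_eq_true_eq]
  constructor
  · rintro (⟨h0, hnear⟩ | ⟨hlt, hnear⟩)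
    · refine ⟨sel.getD (i - 1) 0, (hmem _).mp ?_, ?_, ?_⟩
      · rw [List.getD_eq_getElem sel 0 (by omega)]; exact List.getElem_mem _
      · have := hlow (i - 1) (by omega); omega
      · omega
    · refine ⟨sel.getD i 0, (hmem _).mp ?_, ?_, ?_⟩
      · rw [List.getD_eq_getElem sel 0 hlt]; exact List.getElem_mem _
      · omega
      · have := hhigh i le_rfl hlt; omega
  · rintro ⟨tp, htp, h1, h2⟩
    obtain ⟨j, hjlen, hj⟩ := List.getElem_of_mem ((hmem tp).mpr htp)
    have hjD : sel.getD j 0 = tp := by rw [List.getD_eq_getElem sel 0 hjlen, hj]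
    rcases Nat.lt_or_ge j i with h | h
    · left
      refine ⟨by omega, ?_⟩
      have := pv_sorted_getD hs (show j ≤ i - 1 by omega) (by omega)
      omega
    · right
      refine ⟨by omega, ?_⟩
      have := pv_sorted_getD hs h hjlen
      omega

-- insertIdx as take ++ cons ++ drop (for in-range indices)
theorem pv_insertIdx_eq (p : Int) : ∀ (i : Nat) (sel : List Int), i ≤ sel.length →
    sel.insertIdx i p = sel.take i ++ p :: sel.drop i
  | 0, sel, _ => by simp [List.insertIdx_zero]
  | i + 1, [], h => by simp at h
  | i + 1, a :: sel, h => by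
    simp only [List.insertIdx_succ_cons, List.take_succ_cons, List.drop_succ_cons,
      List.cons_append]
    rw [pv_insertIdx_eq p i sel (by simpa using h)]

theorem pv_insert_sorted (sel : List Int) (p : Int) (hs : sel.Sorted (· ≤ ·))
    {i : Nat} (hle : i ≤ sel.length)
    (hlow : ∀ j, j < i → sel.getD j 0 < p)
    (hhigh : ∀ j, i ≤ j → j < sel.length → p ≤ sel.getD j 0) :
    (sel.insertIdx i p).Sorted (· ≤ ·) := by
  rw [pv_insertIdx_eq p i sel hle]
  have htake : ∀ b ∈ sel.take i, b < p := by
    intro b hb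
    obtain ⟨j, hjlen, hj⟩ := List.getElem_of_mem hb
    rw [List.getElem_take] at hj
    have : sel.getD j 0 = b := by
      rw [List.getD_eq_getElem sel 0 (by simp at hjlen; omega)]; exact hj
    have := hlow j (by simp at hjlen; omega)
    omega
  have hdrop : ∀ b ∈ sel.drop i, p ≤ b := by
    intro b hb
    obtain ⟨j, hjlen, hj⟩ := List.getElem_of_mem hb
    rw [List.getElem_drop] at hj
    have hl : i + j < sel.length := by simp at hjlen; omega
    have : sel.getD (i + j) 0 = b := by rw [List.getD_eq_getElem sel 0 hl]; exact hj
    have := hhigh (i + j) (by omega) hl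
    omega
  rw [List.Sorted, List.pairwise_append]
  refine ⟨(hs.sublist (List.take_sublist _ _)), ?_, ?_⟩
  · exact List.pairwise_cons.mpr ⟨hdrop, hs.sublist (List.drop_sublist _ _)⟩
  · intro a ha b hb
    rcases List.mem_cons.mp hb with rfl | hb
    · exact le_of_lt (htake a ha)
    · exact le_trans (le_of_lt (htake a ha)) (hdrop b hb)

theorem pv_insert_perm (sel res : List Int) (p : Int) (hperm : sel.Perm res)
    {i : Nat} (hle : i ≤ sel.length) :
    (sel.insertIdx i p).Perm (res ++ [p]) := by
  exact ((List.perm_insertIdx p sel hle).trans (hperm.cons p)).trans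
    (List.perm_append_singleton p res).symm

-- main loop invariant: sel is a sorted permutation of res ⇒ the two loops agree
theorem pv_go_eq (points : List Int) : ∀ (take : Int) (sel res : List Int),
    sel.Perm res → sel.Sorted (· ≤ ·) →
    pvB_go take sel res points = pvA_go take res points := by
  induction points with
  | nil => intro _ _ _ _ _; rfl
  | cons point rest ih =>
    intro take sel res hperm hs
    rw [pvA_go, pvB_go]
    by_cases hguard : take ≤ (res.length : Int)
    · simp [hguard]
    · simp only [if_neg hguard]
      obtain ⟨-, hle, hlow, hhigh⟩ := pvB_bisect_spec sel point hs 0 sel.length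
        (Nat.zero_le _) le_rfl (by omega) (by omega)
      rw [pv_conflict_eq sel res point hperm hs]
      by_cases hc : pvA_conflict res point = true
      · rw [if_pos hc, if_pos hc]
        exact ih take sel res hperm hs
      · rw [if_neg hc, if_neg hc]
        exact ih take _ _ (pv_insert_perm sel res point hperm hle)
          (pv_insert_sorted sel point hs hle hlow hhigh)

-- ===== VERDICT (by name: the statement is the Claim_ definition above) =====
theorem get_without_duplicate_py_spec : Claim_equal_get_without_duplicate_py := by
  intro points take _
  unfold Spec_get_without_duplicate_py get_without_duplicate_py get_without_duplicate_py_alt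
  exact (pv_go_eq points take [] [] (List.Perm.refl _) List.Pairwise.nil).symm
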